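-- pv_equiv track=rewrite | github.com/anlausch/ArguminSci | api.py | connect_spans
-- ===== SOURCE A (Python) =====
-- def connect_spans(result):
--     new_result = []
--     for sentence in result:
--         new_sentence = []
--         for i,word_label in enumerate(sentence):
--             word_label[1] = assign_style_classes(word_label[1])
--             new_sentence.append(word_label)
--             if i != len(sentence)-1:
--                 if word_label[1] == assign_style_classes(sentence[i+1][1]):
--                     new_sentence.append([" ", word_label[1]])
--                 else:
--                     new_sentence.append([" ", ""])
--         new_result.append(new_sentence)
--     return new_result
--
-- def assign_style_classes(label):
--     # map the inputs to the function blocks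
--     options = {
--         "Token_Label.BEGIN_BACKGROUND_CLAIM": "background_claim",
--         "Token_Label.INSIDE_BACKGROUND_CLAIM": "background_claim",
--         "Token_Label.BEGIN_OWN_CLAIM": "own_claim",
--         "Token_Label.INSIDE_OWN_CLAIM": "own_claim",
--         "Token_Label.BEGIN_DATA": "data",
--         "Token_Label.INSIDE_DATA": "data",
--         "Token_Label.OUTSIDE": "",
--         "DRI_Outcome": "outcome",
--         "DRI_Approach": "approach",
--         "DRI_Challenge": "challenge",
--         "DRI_Background": "background",
--         "DRI_FutureWork": "future_work",
--         "DRI_Unspecified": "",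
--         "COMMON_PRACTICE": "common_practice",
--         "NOVELTY": "novelty",
--         "ADVANTAGE": "advantage",
--         "DISADVANTAGE": "disadvantage",
--         "ADVANTAGE_DISADVANTAGE": "advantage_disadvantage",
--         "DISADVANTAGE_ADVANTAGE": "disadvantage_advantage",
--         "LIMITATION": "limitation",
--         "BEGIN_CIT_CONTEXT\n": "context",
--         "INSIDE_CIT_CONTEXT\n": "context",
--         "TOTALLY_IRRELEVANT": "totally_irrelevant",
--         "SHOULD_NOT_APPEAR": "should_not_appear",
--         "VERY_RELEVANT": "very_relevant",
--         "RELEVANT": "relevant",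
--         "MAY_APPEAR": "may_appear",
--         "NONE": "",
--         "NONE\n": "",
--         "": ""
--     }
--     return options[label]
-- ===== SOURCE B (Python) =====
-- _STYLE = {
--     "Token_Label.BEGIN_BACKGROUND_CLAIM": "background_claim",
--     "Token_Label.INSIDE_BACKGROUND_CLAIM": "background_claim",
--     "Token_Label.BEGIN_OWN_CLAIM": "own_claim",
--     "Token_Label.INSIDE_OWN_CLAIM": "own_claim",
--     "Token_Label.BEGIN_DATA": "data",
--     "Token_Label.INSIDE_DATA": "data",
--     "Token_Label.OUTSIDE": "",
--     "DRI_Outcome": "outcome",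
--     "DRI_Approach": "approach",
--     "DRI_Challenge": "challenge",
--     "DRI_Background": "background",
--     "DRI_FutureWork": "future_work",
--     "DRI_Unspecified": "",
--     "COMMON_PRACTICE": "common_practice",
--     "NOVELTY": "novelty",
--     "ADVANTAGE": "advantage",
--     "DISADVANTAGE": "disadvantage",
--     "ADVANTAGE_DISADVANTAGE": "advantage_disadvantage",
--     "DISADVANTAGE_ADVANTAGE": "disadvantage_advantage",
--     "LIMITATION": "limitation",
--     "BEGIN_CIT_CONTEXT\n": "context",
--     "INSIDE_CIT_CONTEXT\n": "context",
--     "TOTALLY_IRRELEVANT": "totally_irrelevant",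
--     "SHOULD_NOT_APPEAR": "should_not_appear",
--     "VERY_RELEVANT": "very_relevant",
--     "RELEVANT": "relevant",
--     "MAY_APPEAR": "may_appear",
--     "NONE": "",
--     "NONE\n": "",
--     "": "",
-- }
--
--
-- def _runs(styled):
--     """Group a styled sentence, back to front, into maximal runs of tokens
--     sharing the same style class."""
--     if not styled:
--         return []
--     rs = _runs(styled[1:])
--     if rs and rs[0][0][1] == styled[0][1]:
--         return [[styled[0]] + rs[0]] + rs[1:]
--     return [[styled[0]]] + rs
--
--
-- def _render(runs):
--     """Render runs: inside a run every gap is a styled space [" ", style];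
--     between two runs the gap is an unstyled space [" ", ""]."""
--     if not runs:
--         return []
--     head, rest = runs[0], runs[1:]
--     style = head[0][1]
--     out = [head[0]]
--     for w in head[1:]:
--         out += [[" ", style], w]
--     if rest:
--         out += [[" ", ""]]
--     return out + _render(rest)
--
--
-- def connect_spans(result):
--     # Run-based reconstruction: style every token in place, split each sentence
--     # into maximal runs of equal style, then join runs with spacing tokens.
--     new_result = []
--     for sentence in result:
--         for w in sentence:
--             w[1] = _STYLE[w[1]]
--         new_result.append(_render(_runs(sentence)))
--     return new_result
-- ===== Notes on version B (the rewrite author's own statement) =====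
-- stated objective: alternative
-- what changed: B first styles every token in place, then recursively groups each sentence into maximal runs of tokens with equal style class and renders those runs, joining tokens inside a run with a styled space and adjacent runs with an unstyled space, instead of A's single indexed loop that decides each separator by re-styling the lookahead token sentence[i+1].
import Mathlib
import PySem

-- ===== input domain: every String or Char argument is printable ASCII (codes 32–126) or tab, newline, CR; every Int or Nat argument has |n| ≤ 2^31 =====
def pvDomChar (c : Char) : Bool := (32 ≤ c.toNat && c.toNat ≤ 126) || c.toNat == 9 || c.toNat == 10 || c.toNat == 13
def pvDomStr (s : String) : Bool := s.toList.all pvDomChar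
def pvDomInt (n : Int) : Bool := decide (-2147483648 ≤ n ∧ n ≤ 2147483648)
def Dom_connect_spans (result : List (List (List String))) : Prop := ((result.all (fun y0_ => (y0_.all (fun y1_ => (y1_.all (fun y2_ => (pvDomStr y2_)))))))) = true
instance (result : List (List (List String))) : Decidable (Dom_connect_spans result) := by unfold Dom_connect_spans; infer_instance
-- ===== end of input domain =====

-- B styles each token in place, splits a sentence into maximal runs of equal style class,
-- and joins runs with spacing tokens, instead of A's indexed lookahead loop (alternative
-- decomposition, same cost). Both Pythons mutate the inner word_label lists in place
-- identically; the theorems here are about the return value. Exact on Pre_ (where the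
-- Python raises no KeyError/IndexError).

-- ===== PORT A =====
-- the `options` dict of assign_style_classes (insertion order)
def pvOptions : PySem.Dict String String :=
  PySem.Dict.ofList
  [("Token_Label.BEGIN_BACKGROUND_CLAIM", "background_claim"),
   ("Token_Label.INSIDE_BACKGROUND_CLAIM", "background_claim"),
   ("Token_Label.BEGIN_OWN_CLAIM", "own_claim"),
   ("Token_Label.INSIDE_OWN_CLAIM", "own_claim"),
   ("Token_Label.BEGIN_DATA", "data"),
   ("Token_Label.INSIDE_DATA", "data"),
   ("Token_Label.OUTSIDE", ""),
   ("DRI_Outcome", "outcome"),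
   ("DRI_Approach", "approach"),
   ("DRI_Challenge", "challenge"),
   ("DRI_Background", "background"),
   ("DRI_FutureWork", "future_work"),
   ("DRI_Unspecified", ""),
   ("COMMON_PRACTICE", "common_practice"),
   ("NOVELTY", "novelty"),
   ("ADVANTAGE", "advantage"),
   ("DISADVANTAGE", "disadvantage"),
   ("ADVANTAGE_DISADVANTAGE", "advantage_disadvantage"),
   ("DISADVANTAGE_ADVANTAGE", "disadvantage_advantage"),
   ("LIMITATION", "limitation"),
   ("BEGIN_CIT_CONTEXT\n", "context"),
   ("INSIDE_CIT_CONTEXT\n", "context"),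
   ("TOTALLY_IRRELEVANT", "totally_irrelevant"),
   ("SHOULD_NOT_APPEAR", "should_not_appear"),
   ("VERY_RELEVANT", "very_relevant"),
   ("RELEVANT", "relevant"),
   ("MAY_APPEAR", "may_appear"),
   ("NONE", ""),
   ("NONE\n", ""),
   ("", "")]

-- assign_style_classes; totalized with "" where Python raises KeyError (excluded by Pre_)
def assignStyle (label : String) : String :=
  (PySem.Dict.get? pvOptions label).getD ""

-- A's inner `for i, word_label in enumerate(sentence)` loop: index-carrying recursion over
-- the remaining tokens; reads `sentence[i+1]` through the original sentence like the Python
-- (mutation never touches a later index before it is read). w.getD 1 "" / w.set 1 v are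
-- exact for Python's w[1] read/assignment when 2 ≤ w.length (guaranteed by Pre_).
-- loop body for one token (appends word_label and, if not last, the separator)
def aStep (sentence : List (List String)) (i : Nat) (wl : List String)
    (acc : List (List String)) : List (List String) :=
  let wl' := wl.set 1 (assignStyle (wl.getD 1 ""))
  let acc1 := acc ++ [wl']
  if i ≠ sentence.length - 1 then
    if wl'.getD 1 "" = assignStyle ((sentence.getD (i + 1) []).getD 1 "") then
      acc1 ++ [[" ", wl'.getD 1 ""]]
    else
      acc1 ++ [[" ", ""]]
  else acc1

def aLoop (sentence : List (List String)) (i : Nat) (todo : List (List String))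
    (acc : List (List String)) : List (List String) :=
  match todo with
  | [] => acc
  | wl :: rest => aLoop sentence (i + 1) rest (aStep sentence i wl acc)

def connect_spans (result : List (List (List String))) : List (List (List String)) :=
  result.map (fun sentence => aLoop sentence 0 sentence [])

-- ===== PORT B =====
-- Source B's styling pass (return-value-wise, a map over the sentence)
def styleWord (w : List String) : List String :=
  w.set 1 (assignStyle (w.getD 1 ""))

-- Source B's _runs: back-to-front grouping into maximal runs of equal style class
-- (bRunsAdd is _runs' combine step: prepend styled[0] to the recursive result)
def bRunsAdd (a : List String) : List (List (List String)) → List (List (List String))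
  | [] => [[a]]
  | r :: rs =>
    if (r.getD 0 []).getD 1 "" = a.getD 1 "" then (a :: r) :: rs else [a] :: r :: rs

def bRuns : List (List String) → List (List (List String))
  | [] => []
  | a :: t => bRunsAdd a (bRuns t)

-- Source B's _render: head token, then `for w in head[1:]: out += [[" ", style], w]`,
-- an inter-run unstyled space, and the rendered remaining runs
def bRender : List (List (List String)) → List (List String)
  | [] => []
  | run :: rest =>
    let style := (run.getD 0 []).getD 1 ""
    ([run.getD 0 []] ++ (run.drop 1).foldl (fun acc w => acc ++ [[" ", style], w]) [])
      ++ (if rest.isEmpty then [] else [[" ", ""]]) ++ bRender rest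

def connect_spans_alt (result : List (List (List String))) : List (List (List String)) :=
  result.map (fun sentence => bRender (bRuns (sentence.map styleWord)))

-- ===== PRECONDITION & SPEC =====
-- Pre_ excludes exactly the inputs where the Python A raises: a token list shorter than 2
-- (IndexError on word_label[1]) or a label that is not a key of `options` (KeyError).
def Pre_connect_spans (result : List (List (List String))) : Prop :=
  ∀ sentence ∈ result, ∀ w ∈ sentence,
    2 ≤ w.length ∧ w.getD 1 "" ∈ pvOptions.keys
instance (result : List (List (List String))) : Decidable (Pre_connect_spans result) := by
  unfold Pre_connect_spans; infer_instance

def pvWitness_connect_spans : List (List (List String)) :=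
  [[["An", "Token_Label.BEGIN_DATA"], ["apple", "Token_Label.INSIDE_DATA"], [".", "NONE"]], []]

def Spec_connect_spans (result : List (List (List String))) (out : List (List (List String))) : Prop := out = connect_spans_alt result
instance (result : List (List (List String))) (out : List (List (List String))) : Decidable (Spec_connect_spans result out) := by unfold Spec_connect_spans; infer_instance

-- ===== CLAIM (what is proved, stated in full; the proofs are below) =====
def Claim_equal_connect_spans : Prop := ∀ (result : List (List (List String))), Dom_connect_spans result → Pre_connect_spans result → Spec_connect_spans result (connect_spans result)

-- ===== LEMMAS AND PROOFS =====

-- the separator A places between adjacent styled tokens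
def sepFor (cur nxt : List String) : List String :=
  [" ", if cur.getD 1 "" = nxt.getD 1 "" then cur.getD 1 "" else ""]

-- common reference shape of one output sentence, over the styled token list
def goSent : List (List String) → List (List String)
  | [] => []
  | [a] => [a]
  | a :: b :: t => a :: sepFor a b :: goSent (b :: t)

set_option maxRecDepth 10000 in
theorem getD_styleWord (w : List String) :
    (styleWord w).getD 1 "" = assignStyle (w.getD 1 "") := by
  match w with
  | [] => rfl
  | [a] => rfl
  | a :: b :: t => simp [styleWord, List.getD]

theorem aStep_last (s : List (List String)) (i : Nat) (wl : List String)
    (acc : List (List String)) (h : i = s.length - 1) :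
    aStep s i wl acc = acc ++ [styleWord wl] := by
  simp [aStep, h, styleWord]

theorem aStep_mid (s : List (List String)) (i : Nat) (wl b : List String)
    (acc : List (List String)) (h : i ≠ s.length - 1) (hb : s.getD (i + 1) [] = b) :
    aStep s i wl acc = acc ++ [styleWord wl, sepFor (styleWord wl) (styleWord b)] := by
  simp only [aStep, h, hb, ne_eq, not_false_eq_true, if_true]
  rw [show wl.set 1 (assignStyle (wl.getD 1 "")) = styleWord wl from rfl, ← getD_styleWord b]
  by_cases hc : (styleWord wl).getD 1 "" = (styleWord b).getD 1 ""
  · simp only [List.getD] at hc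
    simp [sepFor, List.getD, hc]
  · simp only [List.getD] at hc
    simp [sepFor, List.getD, hc]

theorem aLoop_eq_go (todo : List (List String)) :
    ∀ (s : List (List String)) (i : Nat) (acc : List (List String)),
      s.drop i = todo → aLoop s i todo acc = acc ++ goSent (todo.map styleWord) := by
  induction todo with
  | nil => intro s i acc _; simp [aLoop, goSent]
  | cons wl rest ih =>
    intro s i acc hdrop
    have hlen : s.length - i = rest.length + 1 := by
      have := congrArg List.length hdrop
      simpa [List.length_drop] using this
    have hdrop1 : s.drop (i + 1) = rest := by
      have : (s.drop i).tail = rest := by rw [hdrop]; rfl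
      simpa [List.tail_drop] using this
    show aLoop s (i + 1) rest (aStep s i wl acc) = acc ++ goSent ((wl :: rest).map styleWord)
    match rest, hdrop1, hlen, ih with
    | [], hdrop1, hlen, ih =>
      have hlast : i = s.length - 1 := by
        simp only [List.length_nil] at hlen; omega
      rw [aStep_last s i wl acc hlast]
      simp [aLoop, goSent]
    | b :: t, hdrop1, hlen, ih =>
      have hne : i ≠ s.length - 1 := by
        simp only [List.length_cons] at hlen; omega
      have hb : s.getD (i + 1) [] = b := by
        have h0 : (s.drop (i + 1))[0]? = some b := by rw [hdrop1]; rfl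
        rw [List.getElem?_drop] at h0
        simp [List.getD, h0]
      rw [aStep_mid s i wl b acc hne hb,
          ih s (i + 1) (acc ++ [styleWord wl, sepFor (styleWord wl) (styleWord b)]) hdrop1]
      simp [goSent]

-- the intra-run foldl as a flatMap
theorem foldl_pairs (style : String) (l : List (List String)) :
    ∀ acc, l.foldl (fun acc w => acc ++ [[" ", style], w]) acc
      = acc ++ l.flatMap (fun w => [[" ", style], w]) := by
  induction l with
  | nil => intro acc; simp
  | cons x xs ih => intro acc; simp [ih, List.append_assoc]

-- bRuns of a nonempty list is a nonempty run list whose first run starts with the head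
theorem bRuns_head (x : List String) (xs : List (List String)) :
    ∃ r0 rest, bRuns (x :: xs) = (x :: r0) :: rest := by
  show ∃ r0 rest, bRunsAdd x (bRuns xs) = (x :: r0) :: rest
  cases h : bRuns xs with
  | nil => exact ⟨[], [], rfl⟩
  | cons r rs =>
    by_cases hc : (r.getD 0 []).getD 1 "" = x.getD 1 ""
    · exact ⟨r, rs, by rw [bRunsAdd, if_pos hc]⟩
    · exact ⟨[], r :: rs, by rw [bRunsAdd, if_neg hc]⟩

-- peeling the head of the first run when it shares its style with the next token
theorem bRender_peel (a b : List String) (r0 : List (List String))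
    (rest : List (List (List String))) (h : a.getD 1 "" = b.getD 1 "") :
    bRender ((a :: b :: r0) :: rest)
      = a :: [" ", a.getD 1 ""] :: bRender ((b :: r0) :: rest) := by
  simp only [bRender, List.getD, List.getElem?_cons_zero, Option.getD_some, List.drop_succ_cons,
    List.drop_zero, foldl_pairs]
  simp only [List.getD] at h
  rw [h]
  simp [List.append_assoc]

theorem bRender_runs_eq_go (styled : List (List String)) :
    bRender (bRuns styled) = goSent styled := by
  induction styled using goSent.induct with
  | case1 => rfl
  | case2 a => simp [bRuns, bRunsAdd, bRender, goSent, List.getD]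
  | case3 a b t ih =>
    obtain ⟨r0, rest, hruns⟩ := bRuns_head b t
    show bRender (bRuns (a :: b :: t)) = a :: sepFor a b :: goSent (b :: t)
    rw [← ih]
    show bRender (bRunsAdd a (bRuns (b :: t))) = a :: sepFor a b :: bRender (bRuns (b :: t))
    rw [hruns]
    by_cases hc : a.getD 1 "" = b.getD 1 ""
    · have hh : ((b :: r0).getD 0 []).getD 1 "" = a.getD 1 "" := by
        simp only [List.getD, List.getElem?_cons_zero, Option.getD_some]
        simp only [List.getD] at hc
        exact hc.symm
      rw [bRunsAdd, if_pos hh, bRender_peel a b r0 rest hc]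
      simp only [List.getD] at hc ⊢
      simp [sepFor, List.getD, hc]
    · have hh : ¬ ((b :: r0).getD 0 []).getD 1 "" = a.getD 1 "" := by
        simp only [List.getD, List.getElem?_cons_zero, Option.getD_some]
        simp only [List.getD] at hc
        exact fun h => hc h.symm
      rw [bRunsAdd, if_neg hh]
      simp only [bRender, List.getD, List.getElem?_cons_zero, Option.getD_some,
        List.drop_succ_cons, List.drop_nil, List.foldl_nil, List.isEmpty_cons]
      simp only [List.getD] at hc
      simp [sepFor, List.getD, hc]

-- ===== VERDICT (by name: the statement is the Claim_ definition above) =====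
theorem connect_spans_spec : Claim_equal_connect_spans := by
  intro result _ _
  unfold Spec_connect_spans connect_spans connect_spans_alt
  apply List.map_congr_left
  intro s _
  rw [aLoop_eq_go s s 0 [] (by simp), bRender_runs_eq_go]
  simp
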